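-- pv_equiv track=rewrite | github.com/seraph776/CodeCrypt776 | Python/Projects/ElectionData/new_code.py | separate_by_district
-- ===== SOURCE A (Python) =====
-- def separate_by_district(data) -> dict:
--     """Separate election_data by district and sort each list by vote in descending order"""
--     # Sort each district by total winning votes in descending order
--     d1 = sorted([i for i in data if i[2] == 1], key=lambda i: i[3], reverse=True)
--     d2 = sorted([i for i in data if i[2] == 2], key=lambda i: i[3], reverse=True)
--     d3 = sorted([i for i in data if i[2] == 3], key=lambda i: i[3], reverse=True)
--     d4 = sorted([i for i in data if i[2] == 4], key=lambda i: i[3], reverse=True)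
--     d5 = sorted([i for i in data if i[2] == 5], key=lambda i: i[3], reverse=True)
--     d6 = sorted([i for i in data if i[2] == 6], key=lambda i: i[3], reverse=True)
--     d7 = sorted([i for i in data if i[2] == 7], key=lambda i: i[3], reverse=True)
--     d8 = sorted([i for i in data if i[2] == 8], key=lambda i: i[3], reverse=True)
--     d9 = sorted([i for i in data if i[2] == 9], key=lambda i: i[3], reverse=True)
--     d10 = sorted([i for i in data if i[2] == 10], key=lambda i: i[3], reverse=True)
--     # Store districts in a dictionary for easier retrieval:
--     districts = {k: v for (k, v) in enumerate([d1, d2, d3, d4, d5, d6, d7, d8, d9, d10], start=1)}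
--     return districts
-- ===== SOURCE B (Python) =====
-- def separate_by_district(data) -> dict:
--     """Separate election_data by district and sort each list by vote in descending order"""
--     districts = {k: [] for k in range(1, 11)}
--     for row in data:
--         if row[2] in districts:
--             districts[row[2]].append(row)
--     for votes in districts.values():
--         votes.sort(key=lambda i: i[3], reverse=True)
--     return districts
-- ===== Notes on version B (the rewrite author's own statement) =====
-- stated objective: simpler
-- what changed: Replaces ten separate full scans of data (one filter+sort per district, one hand-written line each) by one dict of pre-seeded buckets filled in a single pass over data, then a sort per bucket.
import Mathlib
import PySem

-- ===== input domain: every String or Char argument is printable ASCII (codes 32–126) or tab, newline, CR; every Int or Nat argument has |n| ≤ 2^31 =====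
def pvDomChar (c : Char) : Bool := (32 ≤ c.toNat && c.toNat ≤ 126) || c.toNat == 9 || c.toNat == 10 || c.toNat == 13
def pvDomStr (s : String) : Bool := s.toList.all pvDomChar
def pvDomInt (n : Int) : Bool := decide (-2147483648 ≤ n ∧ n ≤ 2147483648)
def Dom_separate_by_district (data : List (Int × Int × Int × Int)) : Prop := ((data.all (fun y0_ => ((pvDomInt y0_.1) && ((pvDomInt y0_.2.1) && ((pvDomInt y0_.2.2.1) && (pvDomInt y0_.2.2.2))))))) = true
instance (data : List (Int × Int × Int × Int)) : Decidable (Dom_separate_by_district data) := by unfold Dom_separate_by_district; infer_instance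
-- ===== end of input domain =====

-- B replaces A's ten separate scans of data (one filter+sort per district) by one pre-seeded
-- bucket dict filled in a single pass over data, then a per-bucket sort.

-- ===== PORT A =====
def separate_by_district (data : List (Int × Int × Int × Int)) : List (Int × List (Int × Int × Int × Int)) :=
  let d1 := PySem.List.sorted (data.filter (fun i => i.2.2.1 == 1)) (fun i => i.2.2.2) true
  let d2 := PySem.List.sorted (data.filter (fun i => i.2.2.1 == 2)) (fun i => i.2.2.2) true
  let d3 := PySem.List.sorted (data.filter (fun i => i.2.2.1 == 3)) (fun i => i.2.2.2) true
  let d4 := PySem.List.sorted (data.filter (fun i => i.2.2.1 == 4)) (fun i => i.2.2.2) true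
  let d5 := PySem.List.sorted (data.filter (fun i => i.2.2.1 == 5)) (fun i => i.2.2.2) true
  let d6 := PySem.List.sorted (data.filter (fun i => i.2.2.1 == 6)) (fun i => i.2.2.2) true
  let d7 := PySem.List.sorted (data.filter (fun i => i.2.2.1 == 7)) (fun i => i.2.2.2) true
  let d8 := PySem.List.sorted (data.filter (fun i => i.2.2.1 == 8)) (fun i => i.2.2.2) true
  let d9 := PySem.List.sorted (data.filter (fun i => i.2.2.1 == 9)) (fun i => i.2.2.2) true
  let d10 := PySem.List.sorted (data.filter (fun i => i.2.2.1 == 10)) (fun i => i.2.2.2) true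
  -- districts = {k: v for (k, v) in enumerate([d1, …, d10], start=1)}
  (PySem.Dict.ofList (PySem.List.enumerate [d1, d2, d3, d4, d5, d6, d7, d8, d9, d10] 1)).items

-- ===== PORT B =====
def separate_by_district_alt (data : List (Int × Int × Int × Int)) : List (Int × List (Int × Int × Int × Int)) :=
  -- districts = {k: [] for k in range(1, 11)}
  let districts : PySem.Dict Int (List (Int × Int × Int × Int)) :=
    (PySem.List.pyRange 1 11 1).foldl (fun d k => d.insert k []) PySem.Dict.empty
  -- for row in data: if row[2] in districts: districts[row[2]].append(row)
  let filled := data.foldl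
    (fun d row => if d.contains row.2.2.1 then d.modify row.2.2.1 [] (fun v => v ++ [row]) else d)
    districts
  -- for votes in districts.values(): votes.sort(key=lambda i: i[3], reverse=True)
  filled.items.map (fun p => (p.1, PySem.List.sorted p.2 (fun i => i.2.2.2) true))

-- ===== PRECONDITION & SPEC =====
def Spec_separate_by_district (data : List (Int × Int × Int × Int)) (out : List (Int × List (Int × Int × Int × Int))) : Prop := out = separate_by_district_alt data
instance (data : List (Int × Int × Int × Int)) (out : List (Int × List (Int × Int × Int × Int))) : Decidable (Spec_separate_by_district data out) := by unfold Spec_separate_by_district; infer_instance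

-- ===== CLAIM (what is proved, stated in full; the proofs are below) =====
def Claim_equal_separate_by_district : Prop := ∀ (data : List (Int × Int × Int × Int)), Dom_separate_by_district data → Spec_separate_by_district data (separate_by_district data)

-- ===== LEMMAS AND PROOFS =====

-- B's filling loop, started on a dict whose items are ks.map (k ↦ (k, f k)), appends at every
-- key k exactly the rows of data whose district field equals k, and drops all other rows.
lemma pv_fill_items (ks : List Int) (hnd : ks.Nodup)
    (data : List (Int × Int × Int × Int)) (f : Int → List (Int × Int × Int × Int)) :
    (data.foldl
      (fun d row => if d.contains row.2.2.1 then d.modify row.2.2.1 [] (fun v => v ++ [row]) else d)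
      (PySem.Dict.mk (ks.map (fun k => (k, f k))))).items
    = ks.map (fun k => (k, f k ++ data.filter (fun i => i.2.2.1 == k))) := by
  induction data generalizing f with
  | nil => simp
  | cons row rest ih =>
    simp only [List.foldl_cons]
    by_cases hc : row.2.2.1 ∈ ks
    · have hcon : (PySem.Dict.mk (ks.map (fun k => (k, f k)))).contains row.2.2.1 = true := by
        simp [PySem.Dict.contains]
        exact hc
      have hkeys : (PySem.Dict.mk (ks.map (fun k => (k, f k)))).keys = ks := by
        simp [PySem.Dict.keys, Function.comp_def]
      have hget : (PySem.Dict.mk (ks.map (fun k => (k, f k)))).getD row.2.2.1 [] = f row.2.2.1 := by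
        apply PySem.Dict.getD_of_mem_items
        · exact List.mem_map_of_mem hc
        · rw [hkeys]; exact hnd
      have hmod : (PySem.Dict.mk (ks.map (fun k => (k, f k)))).modify row.2.2.1 [] (fun v => v ++ [row])
          = PySem.Dict.mk (ks.map (fun k => (k, (fun j => if j = row.2.2.1 then f j ++ [row] else f j) k))) := by
        apply PySem.Dict.ext
        simp only [PySem.Dict.modify, PySem.Dict.insert, hcon, if_true, hget, List.map_map]
        apply List.map_congr_left
        intro k hk
        by_cases h : k = row.2.2.1 <;> simp [h]
      rw [hcon, if_pos rfl, hmod, ih]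
      apply List.map_congr_left
      intro k hk
      by_cases h : k = row.2.2.1
      · subst h
        simp [List.append_assoc]
      · have : (row.2.2.1 == k) = false := by simp [Ne.symm h]
        simp [this, h]
    · have hcon : (PySem.Dict.mk (ks.map (fun k => (k, f k)))).contains row.2.2.1 = false := by
        simp [PySem.Dict.contains]
        intro k hk
        exact fun h => hc (h ▸ hk)
      rw [hcon]
      simp only [Bool.false_eq_true, if_false]
      rw [ih]
      apply List.map_congr_left
      intro k hk
      have : (row.2.2.1 == k) = false := by
        simp only [beq_eq_false_iff_ne, ne_eq]
        exact fun h => hc (h ▸ hk)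
      simp [this]

-- A's dict comprehension over enumerate([d1..d10], 1): ten fresh keys, so items is the literal list.
lemma pv_ofList_enum (a b c d e f g h i j : List (Int × Int × Int × Int)) :
    (PySem.Dict.ofList (PySem.List.enumerate [a, b, c, d, e, f, g, h, i, j] 1)).items
      = [(1, a), (2, b), (3, c), (4, d), (5, e), (6, f), (7, g), (8, h), (9, i), (10, j)] := by
  rw [PySem.Dict.ofList, PySem.Dict.update]
  rw [PySem.Dict.items_foldl_insert_fresh (k := Prod.fst) (v := Prod.snd)]
  · simp [PySem.List.enumerate, PySem.Dict.empty]
  · intro p hp; simp [PySem.Dict.contains_empty]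
  · simp

-- ===== VERDICT (by name: the statement is the Claim_ definition above) =====
theorem separate_by_district_spec : Claim_equal_separate_by_district := by
  intro data _
  show separate_by_district data = separate_by_district_alt data
  simp only [separate_by_district, separate_by_district_alt]
  rw [show ((PySem.List.pyRange 1 11 1).foldl
        (fun (d : PySem.Dict Int (List (Int × Int × Int × Int))) k => d.insert k []) PySem.Dict.empty)
      = PySem.Dict.mk (([1, 2, 3, 4, 5, 6, 7, 8, 9, 10] : List Int).map
          (fun k => (k, (fun _ => ([] : List (Int × Int × Int × Int))) k))) from by decide]
  rw [pv_fill_items ([1, 2, 3, 4, 5, 6, 7, 8, 9, 10]) (by decide) data, pv_ofList_enum]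
  simp only [List.map_cons, List.map_nil, List.nil_append]
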